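-- pv_equiv track=rewrite | github.com/zathrath03/leetcode | 0800-similar-rgb-color/0800-similar-rgb-color.py | similarRGB
-- ===== SOURCE A (Python) =====
-- from typing import Iterator
--
-- def similarRGB(color: str) -> str:
--     def separate_colors(color: str) -> Iterator[str]:
--         for i in range(1, 6, 2):
--             yield color[i:i+2]
--
--     def find_nearest_double_color(color: str) -> str:
--         doubles = {0: "00", 17: "11", 34: "22", 51: "33", 68: "44",
--                    85: "55", 102: "66", 119: "77", 136: "88", 153: "99",
--                    170: "aa", 187: "bb", 204: "cc", 221: "dd", 238: "ee",
--                    255: "ff"}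
--         color_int = int("0x" + color, 16)
--         delta = {abs(k-color_int): v for k, v in doubles.items()}
--
--         return delta[min(delta)]
--
--     output = "#"
--
--     for c in separate_colors(color):
--         output += find_nearest_double_color(c)
--
--     return output
-- ===== SOURCE B (Python) =====
-- def similarRGB(color: str) -> str:
--     out = "#"
--     for i in (1, 3, 5):
--         v = int(color[i:i+2], 16)
--         out += "%02x" % (round(v / 17) * 17)
--     return out
-- ===== Notes on version B (the rewrite author's own statement) =====
-- stated objective: simpler
-- what changed: Replaced the per-channel 16-entry dict, the abs-difference dict comprehension and the min-over-keys scan with the closed-form quantization round(v/17)*17 plus direct %02x formatting.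
-- outside the precondition, e.g. on similarRGB('#_a_a_a'): A returns '#111111', B raises ValueError
import Mathlib
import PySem

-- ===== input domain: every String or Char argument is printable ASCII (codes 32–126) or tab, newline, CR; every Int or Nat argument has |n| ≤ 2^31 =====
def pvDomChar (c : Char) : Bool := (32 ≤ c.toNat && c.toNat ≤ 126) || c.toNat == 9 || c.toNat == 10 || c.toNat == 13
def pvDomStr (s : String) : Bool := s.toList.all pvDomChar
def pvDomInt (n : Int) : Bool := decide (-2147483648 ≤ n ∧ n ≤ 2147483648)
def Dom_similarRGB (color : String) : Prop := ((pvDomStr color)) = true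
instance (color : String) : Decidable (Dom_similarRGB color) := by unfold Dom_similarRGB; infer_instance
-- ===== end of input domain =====

-- B replaces A's 16-entry dict + min-over-absolute-differences scan by the closed-form
-- quantization round(v/17)*17 with direct two-digit hex formatting (objective: simpler).

-- Shared hand port of int(s, 16) (A calls it on the 0x-prefixed slice, B on the bare slice): a fold over
-- hex digit values. Exact on the inputs Pre_ admits — nonempty slices of plain hex digits,
-- where the 0x prefix is a no-op and no sign/space/underscore handling is reachable.
def pvHv (c : Char) : Int :=
  if 48 ≤ c.toNat ∧ c.toNat ≤ 57 then (c.toNat : Int) - 48        -- '0'..'9'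
  else if 97 ≤ c.toNat ∧ c.toNat ≤ 102 then (c.toNat : Int) - 87  -- 'a'..'f'
  else if 65 ≤ c.toNat ∧ c.toNat ≤ 70 then (c.toNat : Int) - 55   -- 'A'..'F'
  else 0

def pvHexToInt (cs : List Char) : Int :=
  cs.foldl (fun a c => 16 * a + pvHv c) 0

-- ===== PORT A =====
-- doubles, in Python's insertion order (values as char lists; the String is built once at the end)
def pvDoubles : List (Int × List Char) :=
  [(0, ['0','0']), (17, ['1','1']), (34, ['2','2']), (51, ['3','3']),
   (68, ['4','4']), (85, ['5','5']), (102, ['6','6']), (119, ['7','7']),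
   (136, ['8','8']), (153, ['9','9']), (170, ['a','a']), (187, ['b','b']),
   (204, ['c','c']), (221, ['d','d']), (238, ['e','e']), (255, ['f','f'])]

def pvNearestOf (ci : Int) : List Char :=
  -- delta = {abs(k-color_int): v for k, v in doubles.items()}
  let delta := pvDoubles.foldl (fun d kv => d.insert (|kv.1 - ci|) kv.2) (PySem.Dict.empty)
  match PySem.List.min? delta.keys (fun x => x) with   -- min(delta) iterates the keys
  | some m => delta.getD m []                          -- delta[min(delta)]
  | none => []                                         -- unreachable: delta is never empty

def pvFindNearestDouble (c : List Char) : List Char :=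
  pvNearestOf (pvHexToInt c)    -- color_int = int('0x' + color, 16)

def similarRGB (color : String) : String :=
  -- separate_colors: color[i:i+2] for i in range(1, 6, 2)
  let chunks := (PySem.List.pyRange 1 6 2).map fun i =>
    PySem.List.slice color.toList (some i) (some (i + 2))
  String.ofList (chunks.foldl (fun out c => out ++ pvFindNearestDouble c) ['#'])

-- ===== PORT B =====
-- '%02x' % r (exact for 0 ≤ r ≤ 255, the only values B feeds it)
def pvFmt02x (r : Int) : List Char :=
  [Nat.digitChar (r.toNat / 16), Nat.digitChar (r.toNat % 16)]

def pvChannelB (cs : List Char) : List Char :=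
  -- round(v/17)*17, with round(v/17) ported as floor((2v+17)/34): exact since 0 ≤ v ≤ 255
  -- and, 17 being odd, v/17 never lands on a half (no banker's-rounding tie, no float error)
  pvFmt02x (17 * PySem.Int.floordiv (2 * pvHexToInt cs + 17) 34)

def similarRGB_alt (color : String) : String :=
  String.ofList ((([1, 3, 5] : List Int)).foldl (fun out i =>
    out ++ pvChannelB (PySem.List.slice color.toList (some i) (some (i + 2)))) ['#'])

-- ===== PRECONDITION & SPEC =====
def pvIsHexDigit (c : Char) : Bool :=
  (48 ≤ c.toNat && c.toNat ≤ 57) || (97 ≤ c.toNat && c.toNat ≤ 102) || (65 ≤ c.toNat && c.toNat ≤ 70)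

-- Pre_ excludes exactly the inputs where int() raises ValueError in A (a channel slice empty or
-- containing a non-hex-digit char); it also excludes the underscore quirk of A's 0x-prefixed
-- int call — on channel slices beginning with an underscore A parses (an underscore is legal
-- right after the base prefix) while B's bare int(c, 16) raises ValueError (see claim cites).
def Pre_similarRGB (color : String) : Prop :=
  6 ≤ color.toList.length ∧ ((color.toList.drop 1).take 6).all pvIsHexDigit = true

instance (color : String) : Decidable (Pre_similarRGB color) := by
  unfold Pre_similarRGB; infer_instance

def pvWitness_similarRGB : String := "#09aF5e"

def Spec_similarRGB (color : String) (out : String) : Prop := out = similarRGB_alt color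
instance (color : String) (out : String) : Decidable (Spec_similarRGB color out) := by
  unfold Spec_similarRGB; infer_instance

-- ===== CLAIM (what is proved, stated in full; the proofs are below) =====
def Claim_equal_similarRGB : Prop :=
  ∀ (color : String), Dom_similarRGB color → Pre_similarRGB color →
    Spec_similarRGB color (similarRGB color)

-- ===== LEMMAS AND PROOFS =====
-- hex digit values are in [0, 16)
theorem pvHvBound (c : Char) : 0 ≤ pvHv c ∧ pvHv c < 16 := by
  unfold pvHv; split_ifs <;> omega

-- the heart: A's dict-and-min nearest-double lookup equals B's closed-form quantization,
-- checked for every channel value 0..255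
set_option maxRecDepth 40000 in
set_option maxHeartbeats 2000000 in
theorem pvNearest_eq_quant : ∀ v : Fin 256,
    pvNearestOf (v : Int) = pvFmt02x (17 * PySem.Int.floordiv (2 * (v : Int) + 17) 34) := by
  decide

theorem pvNearest_eq_quant' (v : Int) (h0 : 0 ≤ v) (h1 : v < 256) :
    pvNearestOf v = pvFmt02x (17 * PySem.Int.floordiv (2 * v + 17) 34) := by
  have h := pvNearest_eq_quant ⟨v.toNat, by omega⟩
  rw [Int.toNat_of_nonneg h0] at h
  exact h

-- per-channel equality for the two slice shapes (any chars: pvHv is bounded by 16 on all of Char)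
theorem pvChan2 (a b : Char) :
    pvFindNearestDouble [a, b] = pvChannelB [a, b] := by
  have hva := pvHvBound a
  have hvb := pvHvBound b
  have hv : pvHexToInt [a, b] = 16 * pvHv a + pvHv b := by
    simp only [pvHexToInt, List.foldl_cons, List.foldl_nil]; ring
  simp only [pvFindNearestDouble, pvChannelB, hv]
  exact pvNearest_eq_quant' _ (by omega) (by omega)

theorem pvChan1 (a : Char) :
    pvFindNearestDouble [a] = pvChannelB [a] := by
  have hva := pvHvBound a
  have hv : pvHexToInt [a] = pvHv a := by
    simp only [pvHexToInt, List.foldl_cons, List.foldl_nil]; ring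
  simp only [pvFindNearestDouble, pvChannelB, hv]
  exact pvNearest_eq_quant' _ (by omega) (by omega)

-- ===== VERDICT (by name: the statement is the Claim_ definition above) =====
theorem similarRGB_spec : Claim_equal_similarRGB := by
  intro color _ hpre
  obtain ⟨hlen, -⟩ := hpre
  unfold Spec_similarRGB similarRGB similarRGB_alt
  have hr : PySem.List.pyRange 1 6 2 = [1, 3, 5] := by decide
  rcases hl : color.toList with _ | ⟨x0, _ | ⟨x1, _ | ⟨x2, _ | ⟨x3, _ | ⟨x4, _ | ⟨x5, rest⟩⟩⟩⟩⟩⟩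
  all_goals rw [hl] at hlen
  all_goals simp only [List.length_cons, List.length_nil] at hlen
  all_goals try omega
  -- color.toList = x0 :: x1 :: x2 :: x3 :: x4 :: x5 :: rest
  have s13 : PySem.List.slice (x0::x1::x2::x3::x4::x5::rest) (some 1) (some 3) = [x1, x2] := by
    simpa using PySem.List.slice_natCast (xs := x0::x1::x2::x3::x4::x5::rest) (a := 1) (b := 3)
  have s35 : PySem.List.slice (x0::x1::x2::x3::x4::x5::rest) (some 3) (some 5) = [x3, x4] := by
    simpa using PySem.List.slice_natCast (xs := x0::x1::x2::x3::x4::x5::rest) (a := 3) (b := 5)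
  have s57 : PySem.List.slice (x0::x1::x2::x3::x4::x5::rest) (some 5) (some 7) = x5 :: rest.take 1 := by
    simpa using PySem.List.slice_natCast (xs := x0::x1::x2::x3::x4::x5::rest) (a := 5) (b := 7)
  simp only [hr, List.map_cons, List.map_nil, List.foldl_cons, List.foldl_nil,
    Int.reduceAdd, s13, s35, s57]
  rw [pvChan2 x1 x2, pvChan2 x3 x4]
  rcases rest with _ | ⟨x6, rest'⟩
  · simp only [List.take_nil]
    rw [pvChan1 x5]
  · simp only [List.take_succ_cons, List.take_zero]
    rw [pvChan2 x5 x6]
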